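-- pv_equiv track=rewrite | github.com/Madjid-CH/cyber-dojo | hiker/hiker.py | get_same_highest_n_cards
-- ===== SOURCE A (Python) =====
-- CARDS_ORDER = ("2", "3", "4", "5", "6", "7", "8", "9", "T", "J", "Q", "K", "A")
--
-- def get_same_highest_n_cards(hand, n):
--     grouped_values = group_cards_by_value(hand)
--     sorted_grouped_values = sorted(
--         grouped_values.items(),
--         key=lambda x: order_of(value_of(x[0])),
--         reverse=True,
--     )
--     for v, cards in sorted_grouped_values:
--         if len(cards) == n:
--             return cards
--
-- def order_of(v):
--     return CARDS_ORDER.index(v)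
--
-- def value_of(card):
--     return card[0]
--
-- def group_cards_by_value(hand):
--     values = set([value_of(card) for card in hand])
--     grouped_cards = {v: [] for v in values}
--     for card in hand:
--         grouped_cards[value_of(card)].append(card)
--     return grouped_cards
-- ===== SOURCE B (Python) =====
-- CARDS_ORDER = ("2", "3", "4", "5", "6", "7", "8", "9", "T", "J", "Q", "K", "A")
--
-- def get_same_highest_n_cards(hand, n):
--     for v in reversed(CARDS_ORDER):
--         cards = [card for card in hand if card[0] == v]
--         if cards and len(cards) == n:
--             return cards
--     return None
-- ===== Notes on version B (the rewrite author's own statement) =====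
-- stated objective: simpler
-- what changed: Replaces build-a-dict-of-groups + sort-items-by-rank + scan with a single walk over the fixed rank table from highest to lowest, filtering the hand per rank and returning the first nonempty group of the requested size.
import Mathlib
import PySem

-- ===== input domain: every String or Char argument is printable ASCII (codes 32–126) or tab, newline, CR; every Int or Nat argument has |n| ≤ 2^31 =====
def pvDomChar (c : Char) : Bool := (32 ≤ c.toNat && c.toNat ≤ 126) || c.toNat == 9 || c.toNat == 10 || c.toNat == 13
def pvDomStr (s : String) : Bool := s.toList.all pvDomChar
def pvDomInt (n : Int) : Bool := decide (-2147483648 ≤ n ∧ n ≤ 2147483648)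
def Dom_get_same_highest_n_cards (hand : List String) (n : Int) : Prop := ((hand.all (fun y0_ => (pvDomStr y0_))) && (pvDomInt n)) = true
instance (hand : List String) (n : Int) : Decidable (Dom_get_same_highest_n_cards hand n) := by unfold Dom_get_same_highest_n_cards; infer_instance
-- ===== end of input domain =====

-- B replaces A's group-into-a-dict + sort-items-by-rank + scan by one walk over the fixed
-- rank table from highest to lowest (objective: simpler).

-- CARDS_ORDER (module-level constant shared by both programs)
def pvCardsOrder : List String := ["2", "3", "4", "5", "6", "7", "8", "9", "T", "J", "Q", "K", "A"]

-- value_of(card) = card[0]; Python's one-character string is modelled as String.ofList [c].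
-- The .getD "" only totalises the IndexError case (empty card), which Pre_ excludes.
def pvValueOf (card : String) : String :=
  ((PySem.Chars.pyGet? card.toList 0).map (fun c => String.ofList [c])).getD ""

-- ===== PORT A =====
-- order_of(v) = CARDS_ORDER.index(v); .getD (-1) only totalises the ValueError case, which Pre_ excludes.
def pvOrderOf (v : String) : Int :=
  ((PySem.List.index? pvCardsOrder v).map (Int.ofNat)).getD (-1)

-- group_cards_by_value
def pvGroupCardsByValue (hand : List String) : PySem.Dict String (List String) :=
  let values := PySem.Set.ofList (hand.map pvValueOf)
  let grouped := values.foldl (fun d v => d.insert v []) PySem.Dict.empty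
  -- grouped_cards[value_of(card)].append(card): the key always exists, so it is d.modify k [] (· ++ [card])
  hand.foldl (fun d card => d.modify (pvValueOf card) [] (fun xs => xs ++ [card])) grouped

-- the 'for v, cards in sorted_grouped_values' loop
def pvFindA (n : Int) : List (String × List String) → Option (List String)
  | [] => none
  | (_, cards) :: rest => if (cards.length : Int) = n then some cards else pvFindA n rest

def get_same_highest_n_cards (hand : List String) (n : Int) : Option (List String) :=
  let grouped := pvGroupCardsByValue hand
  let sortedGrouped := PySem.List.sorted grouped.items (fun x => pvOrderOf (pvValueOf x.1)) true
  pvFindA n sortedGrouped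

-- ===== PORT B =====
-- for v in reversed(CARDS_ORDER): cards = [card for card in hand if card[0] == v]; if cards and len(cards) == n: return cards
def pvAltGo (hand : List String) (n : Int) : List String → Option (List String)
  | [] => none
  | v :: vs =>
      let cards := hand.filter (fun card => pvValueOf card == v)
      if cards ≠ [] ∧ (cards.length : Int) = n then some cards else pvAltGo hand n vs

def get_same_highest_n_cards_alt (hand : List String) (n : Int) : Option (List String) :=
  pvAltGo hand n pvCardsOrder.reverse

-- ===== PRECONDITION & SPEC =====
-- Pre_ excludes exactly the hands on which A raises: a card that is the empty string (IndexError
-- from card[0]) or whose first character is not one of the 13 ranks (ValueError from CARDS_ORDER.index).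
def Pre_get_same_highest_n_cards (hand : List String) (n : Int) : Prop :=
  ∀ card ∈ hand,
    card.toList.head? ∈ (['2','3','4','5','6','7','8','9','T','J','Q','K','A'] : List Char).map some
instance (hand : List String) (n : Int) : Decidable (Pre_get_same_highest_n_cards hand n) := by
  unfold Pre_get_same_highest_n_cards; infer_instance

def pvWitness_get_same_highest_n_cards : List String × Int := (["2h", "Ad", "2s"], 2)

def Spec_get_same_highest_n_cards (hand : List String) (n : Int) (out : Option (List String)) : Prop := out = get_same_highest_n_cards_alt hand n
instance (hand : List String) (n : Int) (out : Option (List String)) : Decidable (Spec_get_same_highest_n_cards hand n out) := by unfold Spec_get_same_highest_n_cards; infer_instance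

-- ===== CLAIM (what is proved, stated in full; the proofs are below) =====
def Claim_equal_get_same_highest_n_cards : Prop := ∀ (hand : List String) (n : Int), Dom_get_same_highest_n_cards hand n → Pre_get_same_highest_n_cards hand n → Spec_get_same_highest_n_cards hand n (get_same_highest_n_cards hand n)


-- ===== LEMMAS AND PROOFS =====

-- the 13 rank characters (proof-side shorthand)
def pvRankChars : List Char := ['2','3','4','5','6','7','8','9','T','J','Q','K','A']

theorem pvCardsOrder_eq_map : pvCardsOrder = pvRankChars.map (fun c => String.ofList [c]) := by decide

theorem pvValueOf_cons (card : String) (c : Char) (h : card.toList.head? = some c) :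
    pvValueOf card = String.ofList [c] := by
  cases hc : card.toList with
  | nil => simp [hc] at h
  | cons x xs =>
    rw [hc] at h
    simp at h
    subst h
    simp [pvValueOf, hc, PySem.Chars.pyGet?, PySem.List.pyGet?, PySem.List.pyIdx?]

-- the items of the grouped dict, given an abstract starting dict of shape ks.map (k, g k)
theorem pvItems_foldl_modify (l ks : List String) (g : String → List String)
    (hnd : ks.Nodup) (hl : ∀ c ∈ l, pvValueOf c ∈ ks) :
    (l.foldl (fun d card => d.modify (pvValueOf card) [] (fun xs => xs ++ [card]))
        (PySem.Dict.mk (ks.map (fun k => (k, g k))))).items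
      = ks.map (fun k => (k, g k ++ l.filter (fun c => pvValueOf c == k))) := by
  induction l generalizing g with
  | nil => simp
  | cons c l ih =>
    have hcks : pvValueOf c ∈ ks := hl c (by simp)
    have hkeys : (PySem.Dict.mk (ks.map (fun k => (k, g k)))).keys = ks := by
      rw [PySem.Dict.keys_mk, List.map_map]
      have hid : ∀ k ∈ ks, ((fun x => x.1) ∘ fun k => (k, g k)) k = k := fun k _ => rfl
      rw [List.map_congr_left hid]
      exact List.map_id ks
    have hcontains : (PySem.Dict.mk (ks.map (fun k => (k, g k)))).contains (pvValueOf c) = true := by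
      rw [PySem.Dict.contains_iff_mem_keys, hkeys]; exact hcks
    have hgetD : (PySem.Dict.mk (ks.map (fun k => (k, g k)))).getD (pvValueOf c) [] = g (pvValueOf c) := by
      refine PySem.Dict.getD_of_mem_items _ ?_ ?_ []
      · exact List.mem_map_of_mem hcks
      · rw [hkeys]; exact hnd
    have hitems : ((PySem.Dict.mk (ks.map (fun k => (k, g k)))).modify (pvValueOf c) [] (fun xs => xs ++ [c])).items
        = ks.map (fun k => (k, if k = pvValueOf c then g k ++ [c] else g k)) := by
      show ((PySem.Dict.mk (ks.map (fun k => (k, g k)))).insert (pvValueOf c)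
        ((PySem.Dict.mk (ks.map (fun k => (k, g k)))).getD (pvValueOf c) [] ++ [c])).items = _
      rw [hgetD, PySem.Dict.items_insert_of_contains _ _ hcontains, List.map_map]
      refine List.map_congr_left (fun k hk => ?_)
      by_cases hkc : k = pvValueOf c
      · subst hkc; simp
      · simp [hkc, beq_iff_eq]
    have hstep : (PySem.Dict.mk (ks.map (fun k => (k, g k)))).modify (pvValueOf c) [] (fun xs => xs ++ [c])
        = PySem.Dict.mk (ks.map (fun k => (k, if k = pvValueOf c then g k ++ [c] else g k))) := by
      conv_lhs => rw [show (PySem.Dict.mk (ks.map (fun k => (k, g k)))).modify (pvValueOf c) [] (fun xs => xs ++ [c])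
        = PySem.Dict.mk ((PySem.Dict.mk (ks.map (fun k => (k, g k)))).modify (pvValueOf c) [] (fun xs => xs ++ [c])).items from rfl]
      rw [hitems]
    rw [List.foldl_cons, hstep, ih (fun k => if k = pvValueOf c then g k ++ [c] else g k)
      (fun x hx => hl x (by simp [hx]))]
    refine List.map_congr_left (fun k hk => ?_)
    by_cases hkc : pvValueOf c = k
    · rw [← hkc]
      simp [List.filter_cons]
    · have hkc' : ¬ k = pvValueOf c := fun h => hkc h.symm
      simp [List.filter_cons, beq_iff_eq, hkc, hkc']

-- the initial {v: [] for v in values} dict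
theorem pvInit_dict (ks : List String) (d : PySem.Dict String (List String))
    (hnd : ks.Nodup) (h : ∀ k ∈ ks, d.contains k = false) :
    (ks.foldl (fun d v => d.insert v ([] : List String)) d).items
      = d.items ++ ks.map (fun k => (k, [])) := by
  induction ks generalizing d with
  | nil => simp
  | cons k ks ih =>
    rw [List.foldl_cons]
    have hik := PySem.Dict.items_insert_of_not_contains d ([] : List String) (h k (by simp))
    rw [ih]
    · rw [hik]; simp
    · exact hnd.of_cons
    · intro k' hk'
      rw [PySem.Dict.contains_insert]
      have hkk : k' ≠ k := fun he => (List.nodup_cons.1 hnd).1 (he ▸ hk')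
      simp [hkk, h k' (by simp [hk'])]

-- items of the full grouping
theorem pvGroup_items (hand : List String) :
    (pvGroupCardsByValue hand).items
      = (PySem.Set.ofList (hand.map pvValueOf)).map
          (fun v => (v, hand.filter (fun c => pvValueOf c == v))) := by
  have hnd := PySem.Set.nodup_ofList (hand.map pvValueOf)
  have hinit : ((PySem.Set.ofList (hand.map pvValueOf) : List String).foldl
        (fun d v => d.insert v ([] : List String)) PySem.Dict.empty)
      = PySem.Dict.mk ((PySem.Set.ofList (hand.map pvValueOf)).map (fun k => (k, []))) := by
    conv_lhs => rw [show ((PySem.Set.ofList (hand.map pvValueOf) : List String).foldl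
        (fun d v => d.insert v ([] : List String)) PySem.Dict.empty)
      = PySem.Dict.mk ((PySem.Set.ofList (hand.map pvValueOf) : List String).foldl
        (fun d v => d.insert v ([] : List String)) PySem.Dict.empty).items from rfl]
    rw [pvInit_dict _ _ hnd (fun k _ => by simp [PySem.Dict.contains_empty])]
    simp [PySem.Dict.empty]
  show (hand.foldl (fun d card => d.modify (pvValueOf card) [] (fun xs => xs ++ [card]))
      ((PySem.Set.ofList (hand.map pvValueOf) : List String).foldl
        (fun d v => d.insert v ([] : List String)) PySem.Dict.empty)).items = _
  rw [hinit]
  have := pvItems_foldl_modify hand (PySem.Set.ofList (hand.map pvValueOf)) (fun _ => []) hnd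
    (fun c hc => by rw [PySem.Set.mem_ofList]; exact List.mem_map_of_mem hc)
  simpa using this

-- membership in the value set is nonemptiness of the per-rank filter
theorem pvMem_vals_iff (hand : List String) (r : String) :
    r ∈ PySem.Set.ofList (hand.map pvValueOf) ↔ hand.filter (fun c => pvValueOf c == r) ≠ [] := by
  rw [PySem.Set.mem_ofList, List.mem_map, Ne, List.filter_eq_nil_iff]
  push_neg
  constructor
  · rintro ⟨c, hc, hv⟩; exact ⟨c, hc, by simp [hv]⟩
  · rintro ⟨c, hc, hv⟩; exact ⟨c, hc, by simpa using hv⟩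

-- the scan over the sorted groups equals B's walk over the rank table
theorem pvScan_eq (hand : List String) (n : Int) (rs : List String) :
    pvFindA n ((rs.filter (fun v => decide (v ∈ PySem.Set.ofList (hand.map pvValueOf)))).map
        (fun v => (v, hand.filter (fun c => pvValueOf c == v))))
      = pvAltGo hand n rs := by
  induction rs with
  | nil => rfl
  | cons r rs ih =>
    have hB : pvAltGo hand n (r :: rs)
        = if hand.filter (fun c => pvValueOf c == r) ≠ [] ∧
              ((hand.filter (fun c => pvValueOf c == r)).length : Int) = n
          then some (hand.filter (fun c => pvValueOf c == r)) else pvAltGo hand n rs := rfl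
    rw [hB, List.filter_cons]
    by_cases hr : r ∈ PySem.Set.ofList (hand.map pvValueOf)
    · have hne : hand.filter (fun c => pvValueOf c == r) ≠ [] := (pvMem_vals_iff hand r).1 hr
      rw [if_pos (by simpa using hr), List.map_cons]
      have hA : pvFindA n ((r, hand.filter (fun c => pvValueOf c == r)) ::
            (rs.filter (fun v => decide (v ∈ PySem.Set.ofList (hand.map pvValueOf)))).map
              (fun v => (v, hand.filter (fun c => pvValueOf c == v))))
          = if ((hand.filter (fun c => pvValueOf c == r)).length : Int) = n
            then some (hand.filter (fun c => pvValueOf c == r))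
            else pvFindA n ((rs.filter (fun v => decide (v ∈ PySem.Set.ofList (hand.map pvValueOf)))).map
              (fun v => (v, hand.filter (fun c => pvValueOf c == v)))) := rfl
      rw [hA]
      by_cases hn : ((hand.filter (fun c => pvValueOf c == r)).length : Int) = n
      · rw [if_pos hn, if_pos ⟨hne, hn⟩]
      · rw [if_neg hn, if_neg (by tauto), ih]
    · have hemp : hand.filter (fun c => pvValueOf c == r) = [] := by
        by_contra hne; exact hr ((pvMem_vals_iff hand r).2 hne)
      rw [if_neg (by simpa using hr), if_neg (by simp [hemp]), ih]

theorem pvPairwise :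
    pvCardsOrder.reverse.Pairwise (fun a b => pvOrderOf (pvValueOf b) < pvOrderOf (pvValueOf a)) := by
  decide

-- ===== VERDICT (by name: the statement is the Claim_ definition above) =====
theorem get_same_highest_n_cards_spec : Claim_equal_get_same_highest_n_cards := by
  intro hand n _ hpre
  unfold Spec_get_same_highest_n_cards get_same_highest_n_cards get_same_highest_n_cards_alt
  have hsub : ∀ x ∈ PySem.Set.ofList (hand.map pvValueOf), x ∈ pvCardsOrder := by
    intro x hx
    rw [PySem.Set.mem_ofList] at hx
    obtain ⟨c, hc, hv⟩ := List.mem_map.1 hx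
    obtain ⟨ch, hch, hhd⟩ := List.mem_map.1 (hpre c hc)
    rw [pvCardsOrder_eq_map, ← hv, pvValueOf_cons c ch hhd.symm]
    exact List.mem_map_of_mem hch
  have hsorted : PySem.List.sorted (pvGroupCardsByValue hand).items
        (fun x => pvOrderOf (pvValueOf x.1)) true
      = (pvCardsOrder.reverse.filter
            (fun v => decide (v ∈ PySem.Set.ofList (hand.map pvValueOf)))).map
          (fun v => (v, hand.filter (fun c => pvValueOf c == v))) := by
    apply PySem.List.sorted_rev_eq_of_perm_of_pairwise_gt
    · rw [pvGroup_items]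
      refine List.Perm.map _ ?_
      refine (List.perm_ext_iff_of_nodup (List.Nodup.filter _ (by decide))
        (PySem.Set.nodup_ofList _)).2 ?_
      intro a
      simp only [List.mem_filter, List.mem_reverse, decide_eq_true_eq]
      exact ⟨fun h => h.2, fun h => ⟨hsub a h, h⟩⟩
    · exact List.pairwise_map.2 (List.Pairwise.sublist List.filter_sublist pvPairwise)
  show pvFindA n (PySem.List.sorted (pvGroupCardsByValue hand).items
      (fun x => pvOrderOf (pvValueOf x.1)) true) = pvAltGo hand n pvCardsOrder.reverse
  rw [hsorted]
  exact pvScan_eq hand n pvCardsOrder.reverse
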